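-- pv_equiv track=rewrite | github.com/dyeap-zz/CS_Practice | Google_leetcode.py | min_strings
-- ===== SOURCE A (Python) =====
-- def min_char_count(string):
--     my_dict = {}
--     for char in string:
--         if char in my_dict:
--             my_dict[char] += 1
--         else:
--             my_dict[char] = 1
--     min_char_occ = list(my_dict.items())[0]
--     for tup_char_occ in my_dict.items():
--         if (min_char_occ[0] > tup_char_occ[0]):
--             min_char_occ = tup_char_occ
--     return min_char_occ
--
-- def min_strings(A, B):
--     res = []
--     li_A = A.split(',')
--     li_B = B.split(',')
--     for string_B in li_B:
--         tot_min_occ = 0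
--         for string_A in li_A:
--             low_B = min_char_count(string_B)
--             low_A = min_char_count(string_A)
--             if (low_B[0] < low_A[0] or (low_A[0] == low_B[0] and low_A[1] < low_B[1])):
--                 tot_min_occ += 1
--         res.append(tot_min_occ)
--     return res
-- ===== SOURCE B (Python) =====
-- def min_strings(A, B):
--     la = A.split(',')
--     lb = B.split(',')
--     # M strictly exceeds every piece length, so (ord(min char), -count) packs into one int key
--     M = 0
--     for s in la + lb:
--         M = max(M, len(s))
--     M += 1
--
--     def key(s):
--         c = min(s)
--         return ord(c) * M - s.count(c)
--
--     ka = sorted([key(s) for s in la])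
--     n = len(ka)
--     out = []
--     for s in lb:
--         k = key(s)
--         lo, hi = 0, n
--         while lo < hi:  # bisect_right: first index with ka[idx] > k
--             mid = (lo + hi) // 2
--             if k < ka[mid]:
--                 hi = mid
--             else:
--                 lo = mid + 1
--         out.append(n - lo)
--     return out
-- ===== Notes on version B (the rewrite author's own statement) =====
-- stated objective: faster
-- what changed: B computes each piece's (min char, count) key once via min()/str.count (no per-pair dict rebuilding), packs it into a single integer, sorts the A-keys and answers each B-piece with a binary search instead of A's rescan of all A-pieces with dict reconstruction per pair.
import Mathlib
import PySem

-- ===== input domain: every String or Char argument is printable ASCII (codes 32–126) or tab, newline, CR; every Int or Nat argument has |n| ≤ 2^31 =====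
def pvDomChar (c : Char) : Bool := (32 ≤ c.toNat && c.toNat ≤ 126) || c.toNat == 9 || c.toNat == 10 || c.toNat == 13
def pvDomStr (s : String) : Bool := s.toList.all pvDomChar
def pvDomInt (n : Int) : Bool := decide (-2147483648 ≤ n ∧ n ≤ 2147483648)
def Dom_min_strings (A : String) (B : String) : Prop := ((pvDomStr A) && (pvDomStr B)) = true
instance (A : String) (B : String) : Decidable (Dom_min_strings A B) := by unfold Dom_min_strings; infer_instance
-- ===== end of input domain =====

-- B replaces A's per-pair dict rebuilding with one integer key per piece computed once,
-- a sort of the A-keys, and a binary search per B-piece (objective: faster).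

-- ===== PORT A =====
def min_char_count (s : String) : Option (Char × Int) :=
  let d := s.toList.foldl
    (fun d c => if d.contains c then d.insert c (d.getD c 0 + 1) else d.insert c 1)
    (PySem.Dict.empty : PySem.Dict Char Int)
  match PySem.List.pyGet? d.items 0 with
  | none => none          -- IndexError on the empty string (excluded by Pre_)
  | some m0 => some (d.items.foldl (fun m t => if m.1 > t.1 then t else m) m0)

def min_strings (A : String) (B : String) : List Int :=
  let liA := (PySem.Str.split? A ",").getD []
  let liB := (PySem.Str.split? B ",").getD []
  liB.foldl (fun res sB =>
    let tot := liA.foldl (fun tot sA =>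
      match min_char_count sB, min_char_count sA with
      | some lowB, some lowA =>
          if lowB.1 < lowA.1 ∨ (lowA.1 = lowB.1 ∧ lowA.2 < lowB.2) then tot + 1 else tot
      | _, _ => tot) (0 : Int)
    res ++ [tot]) []

-- ===== PORT B =====
-- key(s) from Source B: ord(min(s)) * M - s.count(min(s)); min("") raises (excluded by Pre_)
def pvKey (M : Int) (s : String) : Int :=
  let c := (PySem.List.min? s.toList (fun x => x)).getD ' '
  (c.toNat : Int) * M - (PySem.Str.count s (String.ofList [c]) : Int)

-- the while-loop of Source B (bisect_right by hand), recursion on hi - lo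
def pvBisect (ka : List Int) (k : Int) (lo hi : Int) : Int :=
  if h : lo < hi then
    let mid := PySem.Int.floordiv (lo + hi) 2
    if k < PySem.List.pyGetD ka mid 0 then
      pvBisect ka k lo mid
    else
      pvBisect ka k (mid + 1) hi
  else lo
termination_by (hi - lo).toNat
decreasing_by
  · have hlt : PySem.Int.floordiv (lo + hi) 2 < hi :=
      (PySem.Int.floordiv_lt_iff_lt_mul (by norm_num)).mpr (by omega)
    simp only [mid] at *
    omega
  · have hb := PySem.Int.floordiv_two_mid_bounds (le_of_lt h)
    simp only [mid] at *
    omega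

def min_strings_alt (A : String) (B : String) : List Int :=
  let la := (PySem.Str.split? A ",").getD []
  let lb := (PySem.Str.split? B ",").getD []
  let M := (la ++ lb).foldl (fun m s => max m (PySem.Str.len s)) 0 + 1
  let ka := PySem.List.sorted (la.map (pvKey M)) (fun x => x) false
  let n := (ka.length : Int)
  lb.foldl (fun out s => out ++ [n - pvBisect ka (pvKey M s) 0 n]) []

-- ===== PRECONDITION & SPEC =====
-- Pre_ excludes exactly the inputs where some comma-separated piece is empty: there
-- A raises IndexError (list(my_dict.items())[0] on an empty dict) and B raises too (min('')).
def Pre_min_strings (A : String) (B : String) : Prop :=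
  (∀ p ∈ (PySem.Str.split? A ",").getD [], p ≠ "") ∧
  (∀ p ∈ (PySem.Str.split? B ",").getD [], p ≠ "")
instance (A : String) (B : String) : Decidable (Pre_min_strings A B) := by
  unfold Pre_min_strings; infer_instance

def pvWitness_min_strings : String × String := ("ab,c", "b")

def Spec_min_strings (A : String) (B : String) (out : List Int) : Prop := out = min_strings_alt A B
instance (A : String) (B : String) (out : List Int) : Decidable (Spec_min_strings A B out) := by
  unfold Spec_min_strings; infer_instance

-- ===== CLAIM (what is proved, stated in full; the proofs are below) =====
def Claim_equal_min_strings : Prop := ∀ (A : String) (B : String), Dom_min_strings A B → Pre_min_strings A B → Spec_min_strings A B (min_strings A B)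

-- ===== LEMMAS AND PROOFS =====


-- the minimal character of a piece (B's min(s)) and its multiplicity
def pvMc (s : String) : Char := (PySem.List.min? s.toList (fun x => x)).getD ' '
def pvCnt (s : String) : Nat := s.toList.count (pvMc s)

theorem pvMc_spec (s : String) (h : s.toList ≠ []) :
    pvMc s ∈ s.toList ∧ ∀ y ∈ s.toList, pvMc s ≤ y := by
  obtain ⟨x, t, hx⟩ := List.exists_cons_of_ne_nil h
  have hmin : PySem.List.min? s.toList (fun x => x) = some (List.foldl min x t) := by
    rw [hx]; exact PySem.List.min?_id_cons x t
  refine ⟨?_, ?_⟩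
  · have := PySem.List.min?_mem hmin
    simpa [pvMc, hmin] using this
  · intro y hy
    have := PySem.List.min?_isMin hmin y hy
    simpa [pvMc, hmin] using this

theorem chars_count_go_singleton (c : Char) :
    ∀ (t : List Char) (fuel acc : Nat), t.length ≤ fuel →
      PySem.Chars.count.go [c] fuel t acc = acc + t.count c := by
  intro t
  induction t with
  | nil => intro fuel acc _; cases fuel <;> simp [PySem.Chars.count.go]
  | cons x t ih =>
    intro fuel acc hf
    cases fuel with
    | zero => simp at hf
    | succ n =>
      simp only [PySem.Chars.count.go]
      by_cases hcx : c = x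
      · subst hcx
        have hpre : List.isPrefixOf [c] (c :: t) = true := by
          simp [List.isPrefixOf]
        rw [if_pos hpre]
        simp only [List.length_cons] at hf
        rw [show List.drop [c].length (c :: t) = t by simp]
        rw [ih n (acc + 1) (by omega)]
        simp only [List.count_cons, beq_self_eq_true, if_true]
        omega
      · have hpre : List.isPrefixOf [c] (x :: t) = false := by
          simp [List.isPrefixOf, hcx]
        rw [if_neg (by simp [hpre])]
        simp only [List.length_cons] at hf
        rw [ih n acc (by omega)]
        simp only [List.count_cons]
        have : ¬ (x = c) := fun h => hcx h.symm
        simp [this]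

theorem chars_count_singleton (cs : List Char) (c : Char) :
    PySem.Chars.count cs [c] = cs.count c := by
  have h := chars_count_go_singleton c cs cs.length 0 le_rfl
  simp [PySem.Chars.count, h]

theorem pvKey_eq (M : Int) (s : String) :
    pvKey M s = ((pvMc s).toNat : Int) * M - (pvCnt s : Int) := by
  simp only [pvKey, pvMc, pvCnt, PySem.Str.count_eq]
  congr 1
  rw [show (String.ofList [(PySem.List.min? s.toList (fun x => x)).getD ' ']).toList
        = [(PySem.List.min? s.toList (fun x => x)).getD ' '] by simp]
  rw [chars_count_singleton]

theorem foldl_add_prefix : ∀ (u acc : List Char),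
    ∃ r, List.foldl PySem.Set.add acc u = acc ++ r := by
  intro u
  induction u with
  | nil => intro acc; exact ⟨[], by simp⟩
  | cons y u ih =>
    intro acc
    have hstep : PySem.Set.add acc y = acc ∨ PySem.Set.add acc y = acc ++ [y] := by
      unfold PySem.Set.add; split_ifs <;> simp
    rcases hstep with hstep | hstep
    · obtain ⟨r, hr⟩ := ih acc
      exact ⟨r, by simp [List.foldl_cons, hstep, hr]⟩
    · obtain ⟨r, hr⟩ := ih (acc ++ [y])
      exact ⟨[y] ++ r, by simp only [List.foldl_cons, hstep, hr, List.append_assoc]⟩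

theorem foldl_min_pair (f : Char → Int) :
    ∀ (ks : List Char) (k0 : Char),
      (ks.map (fun k => (k, f k))).foldl
          (fun m t => if m.1 > t.1 then t else m) (k0, f k0)
        = (ks.foldl min k0, f (ks.foldl min k0)) := by
  intro ks
  induction ks with
  | nil => intro k0; simp
  | cons k ks ih =>
    intro k0
    simp only [List.map_cons, List.foldl_cons]
    have hstep : (if (k0, f k0).1 > (k, f k).1 then (k, f k) else (k0, f k0))
        = (min k0 k, f (min k0 k)) := by
      simp only [gt_iff_lt, min_def]
      split_ifs with h1 h2 h2
      · exact absurd h1 (not_lt.mpr h2)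
      · rfl
      · rfl
      · exact absurd (le_of_lt (not_le.mp h2)) (fun hh => h1 (lt_of_le_of_ne hh (by
          intro he; exact h2 (le_of_eq he.symm))))
    rw [hstep, ih]

-- A's min_char_count computes exactly (min char, its count)
theorem min_char_count_eq (s : String) (h : s.toList ≠ []) :
    min_char_count s = some (pvMc s, (pvCnt s : Int)) := by
  obtain ⟨x, t, hx⟩ := List.exists_cons_of_ne_nil h
  have hfun : (fun (d : PySem.Dict Char Int) c =>
        if d.contains c then d.insert c (d.getD c 0 + 1) else d.insert c 1)
      = fun d c => d.insert c (d.getD c 0 + 1) := by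
    funext d c
    by_cases hc : d.contains c = true
    · simp [hc]
    · have hc' : d.contains c = false := by simpa using hc
      simp [hc', PySem.Dict.getD_of_not_contains d 0 hc']
  have hshape : ∃ r, PySem.Set.ofList s.toList = x :: r := by
    rw [hx, PySem.Set.ofList_eq_foldl]
    simp only [List.foldl_cons]
    have hadd : PySem.Set.add ([] : List Char) x = [x] := rfl
    rw [hadd]
    obtain ⟨r, hr⟩ := foldl_add_prefix t [x]
    exact ⟨r, by simpa using hr⟩
  obtain ⟨r, hr⟩ := hshape
  have hitems : (PySem.Dict.counter s.toList).items
      = (x :: r).map (fun k => (k, (List.count k s.toList : Int))) := by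
    rw [PySem.Dict.items_counter, hr]
  simp only [min_char_count, hfun, PySem.Dict.foldl_insert_getD_add_one_eq_counter, hitems]
  have hget : PySem.List.pyGet? ((x :: r).map (fun k => (k, (List.count k s.toList : Int)))) 0
      = some (x, (List.count x s.toList : Int)) := by
    simp [PySem.List.pyGet?, PySem.List.pyIdx?]
  rw [hget]
  simp only [List.map_cons, List.foldl_cons, gt_iff_lt, lt_self_iff_false, if_false]
  have hfold := foldl_min_pair (fun k => (List.count k s.toList : Int)) r x
  rw [hfold]
  -- identify the fold minimum with pvMc s
  have hmem_iff : ∀ y : Char, y ∈ x :: r ↔ y ∈ s.toList := by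
    intro y; rw [← hr]; exact PySem.Set.mem_ofList s.toList y
  have hmmem : List.foldl min x r ∈ s.toList := by
    rcases PySem.List.foldl_min_mem r x with h1 | h1
    · rw [← hmem_iff, h1]; exact List.mem_cons_self
    · rw [← hmem_iff]; exact List.mem_cons_of_mem x h1
  have hmle : ∀ y ∈ s.toList, List.foldl min x r ≤ y := by
    intro y hy
    rcases List.mem_cons.mp ((hmem_iff y).mpr hy) with hy' | hy'
    · rw [hy']; exact (PySem.List.foldl_min_le r x).1
    · exact (PySem.List.foldl_min_le r x).2 y hy'
  obtain ⟨hmc_mem, hmc_le⟩ := pvMc_spec s h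
  have hmeq : List.foldl min x r = pvMc s :=
    le_antisymm (hmle _ hmc_mem) (hmc_le _ hmmem)
  rw [hmeq]
  rfl

-- A's comparison on (min char, count) pairs is exactly < on B's packed integer keys
theorem keyLt_iff (M : Int) (p q : String) (hp : p.toList ≠ []) (hq : q.toList ≠ [])
    (hpM : (p.toList.length : Int) < M) (hqM : (q.toList.length : Int) < M) :
    (pvMc q < pvMc p ∨ (pvMc p = pvMc q ∧ (pvCnt p : Int) < (pvCnt q : Int))) ↔
      pvKey M q < pvKey M p := by
  rw [pvKey_eq, pvKey_eq]
  have hnp1 : 1 ≤ (pvCnt p : Int) := by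
    have := List.count_pos_iff.mpr (pvMc_spec p hp).1
    unfold pvCnt; exact_mod_cast this
  have hnq1 : 1 ≤ (pvCnt q : Int) := by
    have := List.count_pos_iff.mpr (pvMc_spec q hq).1
    unfold pvCnt; exact_mod_cast this
  have hnpM : (pvCnt p : Int) < M := by
    have h1 : pvCnt p ≤ p.toList.length := List.count_le_length
    have h2 : (pvCnt p : Int) ≤ (p.toList.length : Int) := by exact_mod_cast h1
    linarith
  have hnqM : (pvCnt q : Int) < M := by
    have h1 : pvCnt q ≤ q.toList.length := List.count_le_length
    have h2 : (pvCnt q : Int) ≤ (q.toList.length : Int) := by exact_mod_cast h1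
    linarith
  have hM0 : (0 : Int) ≤ M := by linarith
  constructor
  · rintro (hlt | ⟨heq, hcnt⟩)
    · have hba : (pvMc q).toNat < (pvMc p).toNat := hlt
      have h1 : ((pvMc q).toNat : Int) + 1 ≤ ((pvMc p).toNat : Int) := by exact_mod_cast hba
      have h2 : (((pvMc q).toNat : Int) + 1) * M ≤ ((pvMc p).toNat : Int) * M :=
        mul_le_mul_of_nonneg_right h1 hM0
      nlinarith
    · rw [heq]
      linarith
  · intro hk
    rcases lt_trichotomy (pvMc q) (pvMc p) with h | h | h
    · exact Or.inl h
    · right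
      refine ⟨h.symm, ?_⟩
      rw [h] at hk
      linarith
    · exfalso
      have hba : (pvMc p).toNat < (pvMc q).toNat := h
      have h1 : ((pvMc p).toNat : Int) + 1 ≤ ((pvMc q).toNat : Int) := by exact_mod_cast hba
      have h2 : (((pvMc p).toNat : Int) + 1) * M ≤ ((pvMc q).toNat : Int) * M :=
        mul_le_mul_of_nonneg_right h1 hM0
      nlinarith

theorem countP_of_split (ka : List Int) (k : Int) (r : Nat) (hr : r ≤ ka.length)
    (h1 : ∀ (j : Nat) (hj : j < ka.length), j < r → ka[j] ≤ k)
    (h2 : ∀ (j : Nat) (hj : j < ka.length), r ≤ j → k < ka[j]) :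
    ka.countP (fun x => decide (k < x)) = ka.length - r := by
  conv_lhs => rw [← List.take_append_drop r ka]
  rw [List.countP_append]
  have ht : (ka.take r).countP (fun x => decide (k < x)) = 0 := by
    rw [List.countP_eq_zero]
    intro a ha
    obtain ⟨j, hj, rfl⟩ := List.mem_iff_getElem.mp ha
    have hjr : j < r := by simp at hj; omega
    have hjl : j < ka.length := by simp at hj; omega
    rw [List.getElem_take]
    simpa using not_lt.mpr (h1 j hjl hjr)
  have hd : (ka.drop r).countP (fun x => decide (k < x)) = (ka.drop r).length := by
    rw [List.countP_eq_length]
    intro a ha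
    obtain ⟨j, hj, rfl⟩ := List.mem_iff_getElem.mp ha
    have hjl : r + j < ka.length := by simp at hj; omega
    rw [List.getElem_drop]
    simpa using h2 (r + j) hjl (by omega)
  rw [ht, hd, List.length_drop]
  omega

theorem pvBisect_inv (ka : List Int) (k : Int)
    (hs : List.Pairwise (· ≤ ·) ka) :
    ∀ (n : Nat) (lo hi : Int), (hi - lo).toNat = n →
    0 ≤ lo → lo ≤ hi → hi ≤ (ka.length : Int) →
    (∀ (j : Nat) (hj : j < ka.length), (j : Int) < lo → ka[j] ≤ k) →
    (∀ (j : Nat) (hj : j < ka.length), hi ≤ (j : Int) → k < ka[j]) →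
    pvBisect ka k lo hi =
      (ka.length : Int) - (ka.countP (fun x => decide (k < x)) : Int) := by
  intro n
  induction n using Nat.strong_induction_on with
  | _ n IH =>
    intro lo hi hn h0 hlh hhn hL hR
    rw [pvBisect]
    split_ifs with hlt
    · obtain ⟨hbl, hbr⟩ := PySem.Int.floordiv_two_mid_bounds (le_of_lt hlt)
      have hmidhi : PySem.Int.floordiv (lo + hi) 2 < hi :=
        (PySem.Int.floordiv_lt_iff_lt_mul (by norm_num)).mpr (by omega)
      have hmidlen : (PySem.Int.floordiv (lo + hi) 2).toNat < ka.length := by omega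
      have hgd : PySem.List.pyGetD ka (PySem.Int.floordiv (lo + hi) 2) 0
          = ka[(PySem.Int.floordiv (lo + hi) 2).toNat] := by
        conv_lhs => rw [show PySem.Int.floordiv (lo + hi) 2
          = (((PySem.Int.floordiv (lo + hi) 2).toNat : Nat) : Int) from by omega]
        rw [PySem.List.pyGetD_natCast]
        exact List.getD_eq_getElem ka 0 hmidlen
      show (if k < PySem.List.pyGetD ka (PySem.Int.floordiv (lo + hi) 2) 0 then
            pvBisect ka k lo (PySem.Int.floordiv (lo + hi) 2)
          else pvBisect ka k (PySem.Int.floordiv (lo + hi) 2 + 1) hi)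
        = (ka.length : Int) - (ka.countP (fun x => decide (k < x)) : Int)
      rw [hgd]
      have hpw := List.pairwise_iff_getElem.mp hs
      split_ifs with hk
      · -- hi := mid
        apply IH (PySem.Int.floordiv (lo + hi) 2 - lo).toNat (by omega) lo
          (PySem.Int.floordiv (lo + hi) 2) rfl h0 (by omega) (by omega) hL
        intro j hj hmj
        rcases eq_or_lt_of_le (show (PySem.Int.floordiv (lo + hi) 2).toNat ≤ j by omega)
          with hje | hje
        · subst hje; exact hk
        · exact lt_of_lt_of_le hk (hpw _ j hmidlen hj hje)
      · -- lo := mid + 1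
        apply IH (hi - (PySem.Int.floordiv (lo + hi) 2 + 1)).toNat (by omega)
          (PySem.Int.floordiv (lo + hi) 2 + 1) hi rfl (by omega) (by omega) hhn
        · intro j hj hmj
          rcases eq_or_lt_of_le (show j ≤ (PySem.Int.floordiv (lo + hi) 2).toNat by omega)
            with hje | hje
          · subst hje; exact not_lt.mp hk
          · exact le_trans (hpw j _ hj hmidlen hje) (not_lt.mp hk)
        · exact hR
    · have hlo : lo = hi := by omega
      have hcp := countP_of_split ka k lo.toNat (by omega)
        (fun j hj hjlo => hL j hj (by omega))
        (fun j hj hjlo => hR j hj (by omega))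
      omega

theorem pvBisect_spec (ka : List Int) (k : Int) (hs : List.Pairwise (· ≤ ·) ka) :
    (ka.length : Int) - pvBisect ka k 0 (ka.length : Int) =
      (ka.countP (fun x => decide (k < x)) : Int) := by
  have hinv := pvBisect_inv ka k hs ((ka.length : Int) - 0).toNat 0 (ka.length : Int) rfl
    (by omega) (by omega) (by omega)
    (fun j hj hjlo => absurd hjlo (by omega))
    (fun j hj hjhi => absurd hjhi (by omega))
  have hle := List.countP_le_length (p := fun x => decide (k < x)) (l := ka)
  omega

-- ===== VERDICT (by name: the statement is the Claim_ definition above) =====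
theorem min_strings_spec : Claim_equal_min_strings := by
  intro A B hDom hPre
  obtain ⟨hA, hB⟩ := hPre
  unfold Spec_min_strings
  simp only [min_strings, min_strings_alt]
  set la := (PySem.Str.split? A ",").getD [] with hla
  set lb := (PySem.Str.split? B ",").getD [] with hlb
  set M := (la ++ lb).foldl (fun m s => max m (PySem.Str.len s)) 0 + 1 with hM
  have hlen : ∀ s ∈ la ++ lb, (s.toList.length : Int) < M := by
    intro s hmem
    have := (PySem.List.le_foldl_max_int (la ++ lb) PySem.Str.len 0).2 s hmem
    rw [PySem.Str.len_eq] at this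
    omega
  set ka := PySem.List.sorted (la.map (pvKey M)) (fun x => x) false with hka
  have hsorted : List.Pairwise (· ≤ ·) ka := by
    have := PySem.List.sorted_pairwise (la.map (pvKey M)) (fun x => x)
    simpa using this
  rw [PySem.List.foldl_append_singleton_eq_map
        (f := fun s => (ka.length : Int) - pvBisect ka (pvKey M s) 0 (ka.length : Int))]
  rw [PySem.List.foldl_append_singleton_eq_map
        (f := fun sB => la.foldl (fun tot sA =>
          match min_char_count sB, min_char_count sA with
          | some lowB, some lowA =>
              if lowB.1 < lowA.1 ∨ (lowA.1 = lowB.1 ∧ lowA.2 < lowB.2) then tot + 1 else tot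
          | _, _ => tot) (0 : Int))]
  simp only [List.nil_append]
  apply List.map_congr_left
  intro sB hsB
  have hsB' : sB.toList ≠ [] := by
    have := hB sB hsB
    simpa using this
  have hsBM : (sB.toList.length : Int) < M := hlen sB (List.mem_append_right la hsB)
  have hinner : la.foldl (fun tot sA =>
        match min_char_count sB, min_char_count sA with
        | some lowB, some lowA =>
            if lowB.1 < lowA.1 ∨ (lowA.1 = lowB.1 ∧ lowA.2 < lowB.2) then tot + 1 else tot
        | _, _ => tot) (0 : Int)
      = la.foldl (fun tot sA =>
          if pvKey M sB < pvKey M sA then tot + 1 else tot) (0 : Int) := by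
    apply PySem.List.foldl_congr_mem
    intro acc sA hsA
    have hsA' : sA.toList ≠ [] := by
      have := hA sA hsA
      simpa using this
    have hsAM : (sA.toList.length : Int) < M := hlen sA (List.mem_append_left lb hsA)
    rw [min_char_count_eq sB hsB', min_char_count_eq sA hsA']
    exact if_congr (keyLt_iff M sA sB hsA' hsB' hsAM hsBM) rfl rfl
  rw [hinner, PySem.List.foldl_ite_add_one (p := fun sA => pvKey M sB < pvKey M sA)]
  rw [pvBisect_spec ka (pvKey M sB) hsorted]
  rw [(PySem.List.sorted_perm (la.map (pvKey M)) (fun x => x) false).countP_eq]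
  rw [List.countP_map]
  simp only [zero_add]
  rfl
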